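-- pv_equiv track=rewrite | github.com/mumuvrf/Academia-Python | Aula 07/classifica_trigo.py | classifica_trigo
-- ===== SOURCE A (Python) =====
-- def classifica_trigo(defeitos):
--     classificacao = []
--
--     for medicao in defeitos:
--         if(medicao > 7): classificacao.append('FT')
--         elif(medicao > 3): classificacao.append('T3')
--         elif(medicao > 2): classificacao.append('T2')
--         else: classificacao.append('T1')
--
--     return classificacao
-- ===== SOURCE B (Python) =====
-- import bisect
--
-- _BREAKS = [2, 3, 7]
-- _LABELS = ['T1', 'T2', 'T3', 'FT']
--
-- def classifica_trigo(defeitos):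
--     return [_LABELS[bisect.bisect_left(_BREAKS, medicao)] for medicao in defeitos]
-- ===== Notes on version B (the rewrite author's own statement) =====
-- stated objective: idiomatic
-- what changed: Replaces the if/elif threshold chain with a precomputed breaks/labels table indexed by bisect_left binary search, built as a list comprehension instead of append in a loop.
import Mathlib
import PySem

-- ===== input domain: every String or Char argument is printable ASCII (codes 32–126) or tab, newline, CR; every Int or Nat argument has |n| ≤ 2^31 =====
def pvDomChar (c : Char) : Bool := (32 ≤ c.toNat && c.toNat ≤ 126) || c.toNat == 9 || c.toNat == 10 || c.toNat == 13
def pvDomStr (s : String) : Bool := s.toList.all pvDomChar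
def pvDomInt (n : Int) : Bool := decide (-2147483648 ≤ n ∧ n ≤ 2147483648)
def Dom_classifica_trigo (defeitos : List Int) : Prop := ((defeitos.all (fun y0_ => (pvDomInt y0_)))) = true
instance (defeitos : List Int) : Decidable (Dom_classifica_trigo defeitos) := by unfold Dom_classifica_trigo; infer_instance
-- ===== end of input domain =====

-- B replaces A's if/elif threshold chain by a precomputed breaks/labels table indexed via bisect_left (idiomatic; same cost).

-- ===== PORT A =====
-- literal port of A: fold appending the label chosen by the if/elif chain
def classifica_trigo (defeitos : List Int) : List String :=
  defeitos.foldl (fun classificacao medicao =>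
    if medicao > 7 then classificacao ++ ["FT"]
    else if medicao > 3 then classificacao ++ ["T3"]
    else if medicao > 2 then classificacao ++ ["T2"]
    else classificacao ++ ["T1"]) []

-- ===== PORT B =====
def pvBreaks : List Int := [2, 3, 7]
def pvLabels : List String := ["T1", "T2", "T3", "FT"]

def classifica_trigo_alt (defeitos : List Int) : List String :=
  defeitos.map (fun medicao =>
    (PySem.List.pyGet? pvLabels (PySem.List.bisectLeft pvBreaks medicao)).getD "")

-- ===== PRECONDITION & SPEC =====
def Spec_classifica_trigo (defeitos : List Int) (out : List String) : Prop := out = classifica_trigo_alt defeitos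
instance (defeitos : List Int) (out : List String) : Decidable (Spec_classifica_trigo defeitos out) := by unfold Spec_classifica_trigo; infer_instance

-- ===== CLAIM (what is proved, stated in full; the proofs are below) =====
def Claim_equal_classifica_trigo : Prop := ∀ (defeitos : List Int), Dom_classifica_trigo defeitos → Spec_classifica_trigo defeitos (classifica_trigo defeitos)

-- ===== LEMMAS AND PROOFS =====

-- per-element: A's if/elif chain picks the same label as B's table lookup
theorem classifica_trigo_elem (m : Int) :
    (if m > 7 then "FT" else if m > 3 then "T3" else if m > 2 then "T2" else "T1") =
      (PySem.List.pyGet? pvLabels (PySem.List.bisectLeft pvBreaks m)).getD "" := by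
  simp only [pvBreaks, pvLabels, PySem.List.bisectLeft, List.length]
  simp [PySem.List.bisectLeftLoop, PySem.List.pyGet?, PySem.List.pyIdx?]
  split_ifs <;> first | rfl | omega

theorem classifica_trigo_eq (defeitos : List Int) :
    classifica_trigo defeitos = classifica_trigo_alt defeitos := by
  unfold classifica_trigo classifica_trigo_alt
  induction defeitos using List.reverseRecOn with
  | nil => rfl
  | append_singleton xs m ih =>
      simp only [List.foldl_append, List.foldl_cons, List.foldl_nil, List.map_append,
        List.map_cons, List.map_nil, ih]
      rw [← classifica_trigo_elem m]
      split_ifs <;> rfl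

-- ===== VERDICT (by name: the statement is the Claim_ definition above) =====
theorem classifica_trigo_spec : Claim_equal_classifica_trigo :=
  fun defeitos _ => classifica_trigo_eq defeitos
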